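-- pv_equiv track=rewrite | github.com/EHnotGod/basketball | 第十五届国/8.py | check
-- ===== SOURCE A (Python) =====
-- def check(cnt, x, zuo, you):
--     tmppre = you - x
--     for i in range(cnt):
--         tmppre = (tmppre + 1) // 2
--         x -= tmppre
--     if x >= zuo:
--         return True
--     else:
--         return False
-- ===== SOURCE B (Python) =====
-- def check(cnt, x, zuo, you):
--     # Closed-form view: after k iterations tmppre equals ceil((you-x)/2**k),
--     # so we compute each subtracted term directly by ceiling division of the
--     # fixed numerator d by a doubling power of two (no chained recurrence),
--     # and once the term hits its limit (1 if d>0 else 0) the rest of the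
--     # iterations all subtract that same constant.
--     d = you - x
--     stop = 1 if d > 0 else 0
--     total = 0
--     p = 2
--     k = 0
--     while k < cnt:
--         term = -((-d) // p)      # ceil(d / p)
--         if term == stop:
--             total += stop * (cnt - k)
--             break
--         total += term
--         p *= 2
--         k += 1
--     return x - total >= zuo
-- ===== Notes on version B (the rewrite author's own statement) =====
-- stated objective: faster
-- what changed: B drops A's chained recurrence on tmppre: each subtracted term is computed directly as the ceiling division -((-d)//p) of the fixed numerator d by a doubling power of two, accumulated into a running total, and once the term hits its limit (1 if d>0 else 0, after O(log|d|) steps) the remaining count is multiplied out in one step.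
import Mathlib
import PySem

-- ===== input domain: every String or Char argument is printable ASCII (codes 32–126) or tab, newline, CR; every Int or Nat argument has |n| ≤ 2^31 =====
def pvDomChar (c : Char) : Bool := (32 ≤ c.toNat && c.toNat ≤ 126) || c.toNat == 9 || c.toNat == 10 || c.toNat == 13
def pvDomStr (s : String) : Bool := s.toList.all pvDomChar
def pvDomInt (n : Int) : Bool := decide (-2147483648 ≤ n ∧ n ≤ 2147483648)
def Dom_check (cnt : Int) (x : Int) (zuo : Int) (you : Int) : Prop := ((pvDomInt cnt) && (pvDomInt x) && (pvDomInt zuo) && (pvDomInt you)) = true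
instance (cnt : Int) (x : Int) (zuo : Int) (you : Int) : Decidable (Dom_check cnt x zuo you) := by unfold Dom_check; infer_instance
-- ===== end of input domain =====

-- B computes each subtracted term directly as ceil(d/2^k) with a doubling power (no chained recurrence)
-- and stops at the term's limit, multiplying out the remaining count (faster in a timing run).

-- ===== PORT A =====
-- the 'for i in range(cnt)' loop, one iteration per fuel unit (fuel = number of remaining iterations)
def checkLoopA : Nat → Int → Int → Int
  | 0, _, x => x
  | n + 1, tmppre, x =>
    let t := PySem.Int.floordiv (tmppre + 1) 2
    checkLoopA n t (x - t)

def check (cnt : Int) (x : Int) (zuo : Int) (you : Int) : Bool :=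
  let x' := checkLoopA cnt.toNat (you - x) x
  if x' ≥ zuo then true else false

-- ===== PORT B =====
-- B's while loop: fuel = cnt - k; state is the doubling power p and the accumulated total;
-- each term is the ceiling division -((-d) // p) of the fixed numerator d
def checkLoopB : Nat → Int → Int → Int → Int → Int
  | 0, _, _, _, total => total
  | n + 1, d, stop, p, total =>
    let term := -(PySem.Int.floordiv (-d) p)
    if term = stop then total + stop * (n + 1)
    else checkLoopB n d stop (p * 2) (total + term)

def check_alt (cnt : Int) (x : Int) (zuo : Int) (you : Int) : Bool :=
  let d := you - x
  let stop : Int := if d > 0 then 1 else 0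
  decide (x - checkLoopB cnt.toNat d stop 2 0 ≥ zuo)

-- ===== PRECONDITION & SPEC =====
def Spec_check (cnt : Int) (x : Int) (zuo : Int) (you : Int) (out : Bool) : Prop := out = check_alt cnt x zuo you
instance (cnt : Int) (x : Int) (zuo : Int) (you : Int) (out : Bool) : Decidable (Spec_check cnt x zuo you out) := by unfold Spec_check; infer_instance

-- ===== CLAIM (what is proved, stated in full; the proofs are below) =====
def Claim_equal_check : Prop := ∀ (cnt : Int) (x : Int) (zuo : Int) (you : Int), Dom_check cnt x zuo you → Spec_check cnt x zuo you (check cnt x zuo you)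

-- ===== LEMMAS AND PROOFS =====

-- one halving step on a ceiling quotient doubles the divisor: (ceil(d/q)+1)//2 = ceil(d/(2q))
theorem ceil_step (d q : Int) (hq : 0 < q) :
    PySem.Int.floordiv (-(PySem.Int.floordiv (-d) q) + 1) 2 = -(PySem.Int.floordiv (-d) (q * 2)) := by
  have h2q : (0:Int) < q * 2 := by omega
  obtain ⟨h1, h2⟩ := (PySem.Int.neg_floordiv_neg_eq_iff_of_pos (a := d)
    (q := -(PySem.Int.floordiv (-d) q)) hq).mp rfl
  obtain ⟨g1, g2⟩ := (PySem.Int.neg_floordiv_neg_eq_iff_of_pos (a := d)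
    (q := -(PySem.Int.floordiv (-d) (q * 2))) h2q).mp rfl
  set a := -(PySem.Int.floordiv (-d) q) with ha
  set b := -(PySem.Int.floordiv (-d) (q * 2)) with hb
  rw [PySem.Int.floordiv_eq_iff_of_pos (show (0:Int) < 2 by omega)]
  constructor
  · -- b * 2 ≤ a + 1, i.e. 2b - 1 ≤ a: from (b-1)*(2q) < d ≤ a*q
    nlinarith [g1, h2]
  · -- a + 1 < (b + 1) * 2, i.e. a ≤ 2b: from (a-1)*q < d ≤ b*(2q)
    nlinarith [h1, g2]

-- at a fixed point, A's loop subtracts tmppre each of the n remaining steps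
theorem checkLoopA_fixed (n : Nat) (t x : Int)
    (h : PySem.Int.floordiv (t + 1) 2 = t) :
    checkLoopA n t x = x - t * n := by
  induction n generalizing x with
  | zero => simp [checkLoopA]
  | succ n ih =>
    simp only [checkLoopA, h, ih]
    push_cast
    ring

-- the stop value (1 if d>0 else 0) is a fixed point of t ↦ (t+1)//2
theorem stop_fixed (d : Int) :
    PySem.Int.floordiv ((if d > 0 then (1:Int) else 0) + 1) 2 = (if d > 0 then (1:Int) else 0) := by
  by_cases h : d > 0 <;> simp [h]

-- main invariant: B's total-out equals total-in plus everything A's loop subtracts,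
-- when A's current tmppre is ceil(d/q) and B's current power is q*2
theorem loops_eq (d : Int) (n : Nat) :
    ∀ (q x total : Int), 0 < q →
    checkLoopB n d (if d > 0 then (1:Int) else 0) (q * 2) total
      = total + (x - checkLoopA n (-(PySem.Int.floordiv (-d) q)) x) := by
  induction n with
  | zero => intro q x total _; simp [checkLoopA, checkLoopB]
  | succ n ih =>
    intro q x total hq
    have hstep := ceil_step d q hq
    simp only [checkLoopA, checkLoopB, hstep]
    by_cases hterm : -(PySem.Int.floordiv (-d) (q * 2)) = (if d > 0 then (1:Int) else 0)
    · rw [if_pos hterm]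
      rw [checkLoopA_fixed n _ _ (by rw [hterm]; exact stop_fixed d)]
      rw [hterm]
      ring
    · rw [if_neg hterm]
      have : q * 2 * 2 = (q * 2) * 2 := by ring
      rw [ih (q * 2) (x - -(PySem.Int.floordiv (-d) (q * 2)))
            (total + -(PySem.Int.floordiv (-d) (q * 2))) (by omega)]
      ring

-- ceil(d/1) = d
theorem ceil_one (d : Int) : -(PySem.Int.floordiv (-d) 1) = d := by
  rw [PySem.Int.floordiv_eq_ediv_of_pos (show (0:Int) < 1 by omega)]
  omega

-- ===== VERDICT (by name: the statement is the Claim_ definition above) =====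
theorem check_spec : Claim_equal_check := by
  intro cnt x zuo you _
  unfold Spec_check check check_alt
  simp only []
  have h := loops_eq (you - x) cnt.toNat 1 x 0 (by omega)
  rw [ceil_one] at h
  simp only [one_mul] at h
  rw [h]
  simp [ge_iff_le]
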